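-- pv_equiv track=rewrite | github.com/jeongwookie/codingTest | baekjoon/문자열/크로아티아알파벳.py | solution
-- ===== SOURCE A (Python) =====
-- def solution(string):
--     croatia_alphabet_group1 = ["c=", "c-", "d-", "s=", "z="]
--     croatia_alphabet_group2 = ["dz=", "lj", "nj"] # dz, lj, nj는 무조건 1글자로 봄
--
--     # string : dz=ak 일때, d z= 가 아니고 dz= 가 우선되어야함.
--     ## 체크 완료한 애는 제거해준다.
--     string_copied = string
--     for word in croatia_alphabet_group2:
--         if word in string_copied:
--             string_copied = string_copied.replace(word, '@')
--
--     for word in croatia_alphabet_group1: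
--         if word in string_copied:
--             string_copied = string_copied.replace(word, '@')
--
--     # 리턴
--     return len(string_copied)
-- ===== SOURCE B (Python) =====
-- def solution(string):
--     # single forward scan: at each position match the longest/priority pattern
--     # (group2 'dz=','lj','nj' before group1 'c=','c-','d-','s=','z='), count one
--     # letter per match, advance by the match length (or 1 on no match).
--     patterns = ("dz=", "lj", "nj", "c=", "c-", "d-", "s=", "z=")
--     i = 0
--     count = 0
--     n = len(string)
--     while i < n:
--         for p in patterns:
--             if string[i:i + len(p)] == p:
--                 i += len(p)
--                 break
--         else:
--             i += 1
--         count += 1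
--     return count
-- ===== Notes on version B (the rewrite author's own statement) =====
-- stated objective: alternative
-- what changed: Replaced the eight sequential str.replace passes (each rewriting the whole string) with a single left-to-right scan that matches the patterns in priority order at each position and counts one letter per match.
import Mathlib
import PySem

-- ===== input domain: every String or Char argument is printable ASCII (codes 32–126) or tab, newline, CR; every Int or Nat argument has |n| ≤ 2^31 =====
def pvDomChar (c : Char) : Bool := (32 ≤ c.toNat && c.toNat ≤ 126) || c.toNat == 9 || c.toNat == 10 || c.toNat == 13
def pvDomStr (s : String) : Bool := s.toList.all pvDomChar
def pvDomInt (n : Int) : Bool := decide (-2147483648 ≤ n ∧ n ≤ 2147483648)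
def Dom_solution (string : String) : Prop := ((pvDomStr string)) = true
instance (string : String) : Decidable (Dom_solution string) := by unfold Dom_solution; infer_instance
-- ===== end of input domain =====

-- B replaces A's eight whole-string replace passes by one left-to-right counting scan (alternative decomposition, same result).

-- ===== PORT A =====
def solution (string : String) : Int :=
  let croatia_alphabet_group1 : List String := ["c=", "c-", "d-", "s=", "z="]
  let croatia_alphabet_group2 : List String := ["dz=", "lj", "nj"]
  let string_copied := string
  let string_copied := croatia_alphabet_group2.foldl
    (fun sc word => if PySem.Str.isIn word sc then PySem.Str.replace sc word "@" else sc) string_copied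
  let string_copied := croatia_alphabet_group1.foldl
    (fun sc word => if PySem.Str.isIn word sc then PySem.Str.replace sc word "@" else sc) string_copied
  (PySem.Str.len string_copied : Int)

-- ===== PORT B =====
-- the while loop of Source B: at each position try the patterns in priority order
-- ("dz=", "lj", "nj", "c=", "c-", "d-", "s=", "z="), advance by the match
-- length (1 on no match) and count one letter per step.
def solGo : List Char → Int → Int
  | [], count => count
  | 'd'::'z'::'='::t, count => solGo t (count + 1)
  | 'l'::'j'::t, count => solGo t (count + 1)
  | 'n'::'j'::t, count => solGo t (count + 1)
  | 'c'::'='::t, count => solGo t (count + 1)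
  | 'c'::'-'::t, count => solGo t (count + 1)
  | 'd'::'-'::t, count => solGo t (count + 1)
  | 's'::'='::t, count => solGo t (count + 1)
  | 'z'::'='::t, count => solGo t (count + 1)
  | _::t, count => solGo t (count + 1)

def solution_alt (string : String) : Int := solGo string.toList 0

-- ===== PRECONDITION & SPEC =====
def Spec_solution (string : String) (out : Int) : Prop := out = solution_alt string
instance (string : String) (out : Int) : Decidable (Spec_solution string out) := by unfold Spec_solution; infer_instance

-- ===== CLAIM (what is proved, stated in full; the proofs are below) =====
def Claim_equal_solution : Prop := ∀ (string : String), Dom_solution string → Spec_solution string (solution string)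

-- ===== LEMMAS AND PROOFS =====

-- proof-side model of one Python replace pass (leftmost, non-overlapping) on char lists
def rep (p : List Char) : List Char → List Char
  | [] => []
  | c :: t => if p.isPrefixOf (c :: t) then '@' :: rep p (t.drop (p.length - 1)) else c :: rep p t
termination_by l => l.length
decreasing_by
  all_goals simp


theorem rep_nil (p : List Char) : rep p [] = [] := by simp [rep]

theorem rep_pass (p : List Char) (c : Char) (X : List Char)
    (h : p.isPrefixOf (c :: X) = false) : rep p (c :: X) = c :: rep p X := by
  rw [rep, h]; simp

theorem rep_match (p : List Char) (c : Char) (X : List Char)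
    (h : p.isPrefixOf (c :: X) = true) :
    rep p (c :: X) = '@' :: rep p (X.drop (p.length - 1)) := by
  rw [rep, h]; simp

theorem head?_rep (p t : List Char) :
    (rep p t).head? = t.head? ∨ (rep p t).head? = some '@' := by
  cases t with
  | nil => left; simp [rep]
  | cons c t =>
    by_cases h : p.isPrefixOf (c :: t) = true
    · right; rw [rep_match p c t h]; rfl
    · left; rw [rep_pass p c t (Bool.eq_false_iff.mpr h)]; rfl

theorem go_eq (old : List Char) (hold : old ≠ []) :
    ∀ (fuel : Nat) (l acc : List Char), l.length ≤ fuel →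
      PySem.Chars.replace.go old ['@'] fuel l acc = acc.reverse ++ rep old l := by
  intro fuel
  induction fuel with
  | zero =>
    intro l acc hl
    have : l = [] := by cases l <;> simp_all
    subst this; simp [PySem.Chars.replace.go, rep_nil]
  | succ n ih =>
    intro l acc hl
    cases l with
    | nil => simp [PySem.Chars.replace.go, rep_nil]
    | cons c t =>
      by_cases h : old.isPrefixOf (c :: t) = true
      · rw [PySem.Chars.replace.go, if_pos h, rep_match old c t h]
        have hlen : (t.drop (old.length - 1)).length ≤ n := by
          have : 1 ≤ old.length := by cases old <;> simp_all
          have := List.length_drop (l := t) (i := old.length - 1)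
          simp at hl ⊢
          omega
        have hdrop : List.drop old.length (c :: t) = t.drop (old.length - 1) := by
          conv_lhs => rw [show old.length = (old.length - 1) + 1 by cases old <;> simp_all]
          rw [List.drop_succ_cons]
        rw [hdrop, ih _ _ hlen]
        simp
      · rw [PySem.Chars.replace.go, if_neg h, rep_pass old c t (Bool.eq_false_iff.mpr h),
            ih _ _ (by simp at hl ⊢; omega)]
        simp

theorem replace_eq_rep (s old : List Char) (hold : old ≠ []) :
    PySem.Chars.replace s old ['@'] = rep old s := by
  rw [PySem.Chars.replace]
  rw [if_neg (by simpa using hold)]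
  rw [go_eq old hold s.length s [] le_rfl]
  simp

theorem rep_of_not_infix (p s : List Char) (h : ¬ p <:+: s) : rep p s = s := by
  induction s with
  | nil => exact rep_nil p
  | cons c t ih =>
    have hpre : p.isPrefixOf (c :: t) = false := by
      by_contra hc
      exact h (List.IsPrefix.isInfix (List.isPrefixOf_iff_prefix.mp (by simpa using hc)))
    rw [rep_pass p c t hpre, ih (fun hi => h (hi.trans (List.suffix_cons c t).isInfix))]

def pipe (s : List Char) : List Char :=
  rep ['z','='] (rep ['s','='] (rep ['d','-'] (rep ['c','-'] (rep ['c','='] (rep ['n','j'] (rep ['l','j'] (rep ['d','z','='] s)))))))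

theorem head_chain (p Y t : List Char) (h : Y.head? = t.head? ∨ Y.head? = some '@') :
    (rep p Y).head? = t.head? ∨ (rep p Y).head? = some '@' := by
  rcases head?_rep p Y with h' | h'
  · rw [h']; exact h
  · right; exact h'

theorem pre2_false (a b c : Char) (X t : List Char)
    (hX : X.head? = t.head? ∨ X.head? = some '@') (hb : b ≠ '@')
    (h : List.isPrefixOf [a, b] (c :: t) = false) :
    List.isPrefixOf [a, b] (c :: X) = false := by
  by_cases hac : a = c
  · subst hac
    cases t with
    | nil =>
      cases X with
      | nil => simp [List.isPrefixOf]
      | cons x X' => simp at hX; simp [List.isPrefixOf, hX, hb]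
    | cons d t' =>
      simp [List.isPrefixOf] at h
      cases X with
      | nil => simp [List.isPrefixOf]
      | cons x X' =>
        simp at hX
        simp [List.isPrefixOf]
        rcases hX with hX | hX
        · simp_all
        · simp_all
  · simp [List.isPrefixOf, hac]

theorem pipe_default (c : Char) (t : List Char)
    (h1 : List.isPrefixOf ['d','z','='] (c :: t) = false)
    (h2 : List.isPrefixOf ['l','j'] (c :: t) = false)
    (h3 : List.isPrefixOf ['n','j'] (c :: t) = false)
    (h4 : List.isPrefixOf ['c','='] (c :: t) = false)
    (h5 : List.isPrefixOf ['c','-'] (c :: t) = false)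
    (h6 : List.isPrefixOf ['d','-'] (c :: t) = false)
    (h7 : List.isPrefixOf ['s','='] (c :: t) = false)
    (h8 : List.isPrefixOf ['z','='] (c :: t) = false) :
    pipe (c :: t) = c :: pipe t := by
  have hY1 := head?_rep ['d','z','='] t
  have hY2 := head_chain ['l','j'] _ t hY1
  have hY3 := head_chain ['n','j'] _ t hY2
  have hY4 := head_chain ['c','='] _ t hY3
  have hY5 := head_chain ['c','-'] _ t hY4
  have hY6 := head_chain ['d','-'] _ t hY5
  have hY7 := head_chain ['s','='] _ t hY6
  rw [pipe, rep_pass _ _ _ h1,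
      rep_pass _ _ _ (pre2_false 'l' 'j' c _ t hY1 (by decide) h2),
      rep_pass _ _ _ (pre2_false 'n' 'j' c _ t hY2 (by decide) h3),
      rep_pass _ _ _ (pre2_false 'c' '=' c _ t hY3 (by decide) h4),
      rep_pass _ _ _ (pre2_false 'c' '-' c _ t hY4 (by decide) h5),
      rep_pass _ _ _ (pre2_false 'd' '-' c _ t hY5 (by decide) h6),
      rep_pass _ _ _ (pre2_false 's' '=' c _ t hY6 (by decide) h7),
      rep_pass _ _ _ (pre2_false 'z' '=' c _ t hY7 (by decide) h8),
      pipe]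

theorem pipe_dz (t : List Char) : pipe ('d'::'z'::'='::t) = '@' :: pipe t := by
  rw [pipe]
  -- no earlier stages
  rw [rep_match ['d','z','='] 'd' _ (by simp [List.isPrefixOf])]
  norm_num
  rw [rep_pass ['l','j'] '@' _ (by simp [List.isPrefixOf]),
      rep_pass ['n','j'] '@' _ (by simp [List.isPrefixOf]),
      rep_pass ['c','='] '@' _ (by simp [List.isPrefixOf]),
      rep_pass ['c','-'] '@' _ (by simp [List.isPrefixOf]),
      rep_pass ['d','-'] '@' _ (by simp [List.isPrefixOf]),
      rep_pass ['s','='] '@' _ (by simp [List.isPrefixOf]),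
      rep_pass ['z','='] '@' _ (by simp [List.isPrefixOf])]
  rfl

theorem pipe_lj (t : List Char) : pipe ('l'::'j'::t) = '@' :: pipe t := by
  rw [pipe]
  rw [rep_pass ['d','z','='] 'l' _ (by simp [List.isPrefixOf]),
      rep_pass ['d','z','='] 'j' _ (by simp [List.isPrefixOf])]
  rw [rep_match ['l','j'] 'l' _ (by simp [List.isPrefixOf])]
  norm_num
  rw [rep_pass ['n','j'] '@' _ (by simp [List.isPrefixOf]),
      rep_pass ['c','='] '@' _ (by simp [List.isPrefixOf]),
      rep_pass ['c','-'] '@' _ (by simp [List.isPrefixOf]),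
      rep_pass ['d','-'] '@' _ (by simp [List.isPrefixOf]),
      rep_pass ['s','='] '@' _ (by simp [List.isPrefixOf]),
      rep_pass ['z','='] '@' _ (by simp [List.isPrefixOf])]
  rfl

theorem pipe_nj (t : List Char) : pipe ('n'::'j'::t) = '@' :: pipe t := by
  rw [pipe]
  rw [rep_pass ['d','z','='] 'n' _ (by simp [List.isPrefixOf]),
      rep_pass ['d','z','='] 'j' _ (by simp [List.isPrefixOf]),
      rep_pass ['l','j'] 'n' _ (by simp [List.isPrefixOf]),
      rep_pass ['l','j'] 'j' _ (by simp [List.isPrefixOf])]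
  rw [rep_match ['n','j'] 'n' _ (by simp [List.isPrefixOf])]
  norm_num
  rw [rep_pass ['c','='] '@' _ (by simp [List.isPrefixOf]),
      rep_pass ['c','-'] '@' _ (by simp [List.isPrefixOf]),
      rep_pass ['d','-'] '@' _ (by simp [List.isPrefixOf]),
      rep_pass ['s','='] '@' _ (by simp [List.isPrefixOf]),
      rep_pass ['z','='] '@' _ (by simp [List.isPrefixOf])]
  rfl

theorem pipe_ceq (t : List Char) : pipe ('c'::'='::t) = '@' :: pipe t := by
  rw [pipe]
  rw [rep_pass ['d','z','='] 'c' _ (by simp [List.isPrefixOf]),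
      rep_pass ['d','z','='] '=' _ (by simp [List.isPrefixOf]),
      rep_pass ['l','j'] 'c' _ (by simp [List.isPrefixOf]),
      rep_pass ['l','j'] '=' _ (by simp [List.isPrefixOf]),
      rep_pass ['n','j'] 'c' _ (by simp [List.isPrefixOf]),
      rep_pass ['n','j'] '=' _ (by simp [List.isPrefixOf])]
  rw [rep_match ['c','='] 'c' _ (by simp [List.isPrefixOf])]
  norm_num
  rw [rep_pass ['c','-'] '@' _ (by simp [List.isPrefixOf]),
      rep_pass ['d','-'] '@' _ (by simp [List.isPrefixOf]),
      rep_pass ['s','='] '@' _ (by simp [List.isPrefixOf]),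
      rep_pass ['z','='] '@' _ (by simp [List.isPrefixOf])]
  rfl

theorem pipe_cm (t : List Char) : pipe ('c'::'-'::t) = '@' :: pipe t := by
  rw [pipe]
  rw [rep_pass ['d','z','='] 'c' _ (by simp [List.isPrefixOf]),
      rep_pass ['d','z','='] '-' _ (by simp [List.isPrefixOf]),
      rep_pass ['l','j'] 'c' _ (by simp [List.isPrefixOf]),
      rep_pass ['l','j'] '-' _ (by simp [List.isPrefixOf]),
      rep_pass ['n','j'] 'c' _ (by simp [List.isPrefixOf]),
      rep_pass ['n','j'] '-' _ (by simp [List.isPrefixOf]),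
      rep_pass ['c','='] 'c' _ (by simp [List.isPrefixOf]),
      rep_pass ['c','='] '-' _ (by simp [List.isPrefixOf])]
  rw [rep_match ['c','-'] 'c' _ (by simp [List.isPrefixOf])]
  norm_num
  rw [rep_pass ['d','-'] '@' _ (by simp [List.isPrefixOf]),
      rep_pass ['s','='] '@' _ (by simp [List.isPrefixOf]),
      rep_pass ['z','='] '@' _ (by simp [List.isPrefixOf])]
  rfl

theorem pipe_dm (t : List Char) : pipe ('d'::'-'::t) = '@' :: pipe t := by
  rw [pipe]
  rw [rep_pass ['d','z','='] 'd' _ (by simp [List.isPrefixOf]),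
      rep_pass ['d','z','='] '-' _ (by simp [List.isPrefixOf]),
      rep_pass ['l','j'] 'd' _ (by simp [List.isPrefixOf]),
      rep_pass ['l','j'] '-' _ (by simp [List.isPrefixOf]),
      rep_pass ['n','j'] 'd' _ (by simp [List.isPrefixOf]),
      rep_pass ['n','j'] '-' _ (by simp [List.isPrefixOf]),
      rep_pass ['c','='] 'd' _ (by simp [List.isPrefixOf]),
      rep_pass ['c','='] '-' _ (by simp [List.isPrefixOf]),
      rep_pass ['c','-'] 'd' _ (by simp [List.isPrefixOf]),
      rep_pass ['c','-'] '-' _ (by simp [List.isPrefixOf])]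
  rw [rep_match ['d','-'] 'd' _ (by simp [List.isPrefixOf])]
  norm_num
  rw [rep_pass ['s','='] '@' _ (by simp [List.isPrefixOf]),
      rep_pass ['z','='] '@' _ (by simp [List.isPrefixOf])]
  rfl

theorem pipe_seq (t : List Char) : pipe ('s'::'='::t) = '@' :: pipe t := by
  rw [pipe]
  rw [rep_pass ['d','z','='] 's' _ (by simp [List.isPrefixOf]),
      rep_pass ['d','z','='] '=' _ (by simp [List.isPrefixOf]),
      rep_pass ['l','j'] 's' _ (by simp [List.isPrefixOf]),
      rep_pass ['l','j'] '=' _ (by simp [List.isPrefixOf]),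
      rep_pass ['n','j'] 's' _ (by simp [List.isPrefixOf]),
      rep_pass ['n','j'] '=' _ (by simp [List.isPrefixOf]),
      rep_pass ['c','='] 's' _ (by simp [List.isPrefixOf]),
      rep_pass ['c','='] '=' _ (by simp [List.isPrefixOf]),
      rep_pass ['c','-'] 's' _ (by simp [List.isPrefixOf]),
      rep_pass ['c','-'] '=' _ (by simp [List.isPrefixOf]),
      rep_pass ['d','-'] 's' _ (by simp [List.isPrefixOf]),
      rep_pass ['d','-'] '=' _ (by simp [List.isPrefixOf])]
  rw [rep_match ['s','='] 's' _ (by simp [List.isPrefixOf])]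
  norm_num
  rw [rep_pass ['z','='] '@' _ (by simp [List.isPrefixOf])]
  rfl

theorem pipe_zeq (t : List Char) : pipe ('z'::'='::t) = '@' :: pipe t := by
  rw [pipe]
  rw [rep_pass ['d','z','='] 'z' _ (by simp [List.isPrefixOf]),
      rep_pass ['d','z','='] '=' _ (by simp [List.isPrefixOf]),
      rep_pass ['l','j'] 'z' _ (by simp [List.isPrefixOf]),
      rep_pass ['l','j'] '=' _ (by simp [List.isPrefixOf]),
      rep_pass ['n','j'] 'z' _ (by simp [List.isPrefixOf]),
      rep_pass ['n','j'] '=' _ (by simp [List.isPrefixOf]),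
      rep_pass ['c','='] 'z' _ (by simp [List.isPrefixOf]),
      rep_pass ['c','='] '=' _ (by simp [List.isPrefixOf]),
      rep_pass ['c','-'] 'z' _ (by simp [List.isPrefixOf]),
      rep_pass ['c','-'] '=' _ (by simp [List.isPrefixOf]),
      rep_pass ['d','-'] 'z' _ (by simp [List.isPrefixOf]),
      rep_pass ['d','-'] '=' _ (by simp [List.isPrefixOf]),
      rep_pass ['s','='] 'z' _ (by simp [List.isPrefixOf]),
      rep_pass ['s','='] '=' _ (by simp [List.isPrefixOf])]
  rw [rep_match ['z','='] 'z' _ (by simp [List.isPrefixOf])]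
  norm_num
  rfl

theorem pre2_of_excl (a b x : Char) (t : List Char)
    (h : ∀ t1, x = a → t = b :: t1 → False) :
    List.isPrefixOf [a, b] (x :: t) = false := by
  by_cases hx : a = x
  · subst hx
    cases t with
    | nil => simp [List.isPrefixOf]
    | cons d t' =>
      by_cases hd : b = d
      · exact (h t' rfl (by rw [hd])).elim
      · simp [List.isPrefixOf, hd]
  · simp [List.isPrefixOf, hx]

theorem pre3_of_excl (a b e x : Char) (t : List Char)
    (h : ∀ t1, x = a → t = b :: e :: t1 → False) :
    List.isPrefixOf [a, b, e] (x :: t) = false := by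
  by_cases hx : a = x
  · subst hx
    cases t with
    | nil => simp [List.isPrefixOf]
    | cons d t' =>
      by_cases hd : b = d
      · subst hd
        cases t' with
        | nil => simp [List.isPrefixOf]
        | cons f t'' =>
          by_cases hf : e = f
          · exact (h t'' rfl (by rw [hf])).elim
          · simp [List.isPrefixOf, hf]
      · simp [List.isPrefixOf, hd]
  · simp [List.isPrefixOf, hx]

theorem main_eq (s : List Char) (count : Int) :
    solGo s count = count + ((pipe s).length : Int) := by
  fun_induction solGo s count with
  | case1 c => simp [pipe, rep]
  | case2 t c ih => rw [pipe_dz, ih]; simp; omega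
  | case3 t c ih => rw [pipe_lj, ih]; simp; omega
  | case4 t c ih => rw [pipe_nj, ih]; simp; omega
  | case5 t c ih => rw [pipe_ceq, ih]; simp; omega
  | case6 t c ih => rw [pipe_cm, ih]; simp; omega
  | case7 t c ih => rw [pipe_dm, ih]; simp; omega
  | case8 t c ih => rw [pipe_seq, ih]; simp; omega
  | case9 t c ih => rw [pipe_zeq, ih]; simp; omega
  | case10 x t c ih h1 h2 h3 h4 h5 h6 h7 h8 =>
    rw [pipe_default x t (pre3_of_excl 'd' 'z' '=' x t ih)
        (pre2_of_excl 'l' 'j' x t h1) (pre2_of_excl 'n' 'j' x t h2)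
        (pre2_of_excl 'c' '=' x t h3) (pre2_of_excl 'c' '-' x t h4)
        (pre2_of_excl 'd' '-' x t h5) (pre2_of_excl 's' '=' x t h6)
        (pre2_of_excl 'z' '=' x t h7), h8]
    simp
    omega

theorem str_step (sc w : String) (hw : w.toList ≠ []) :
    (if PySem.Str.isIn w sc then PySem.Str.replace sc w "@" else sc).toList
      = rep w.toList sc.toList := by
  by_cases h : PySem.Str.isIn w sc = true
  · rw [if_pos h, PySem.Str.toList_replace]
    exact replace_eq_rep sc.toList w.toList hw
  · rw [if_neg h]
    have hinf : ¬ w.toList <:+: sc.toList := fun hi =>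
      h ((PySem.Str.isIn_iff_infix w sc).mpr hi)
    exact (rep_of_not_infix w.toList sc.toList hinf).symm

theorem solution_eq_pipe (string : String) :
    solution string = ((pipe string.toList).length : Int) := by
  unfold solution
  simp only [List.foldl]
  rw [PySem.Str.len_eq]
  rw [str_step _ _ (by decide), str_step _ _ (by decide), str_step _ _ (by decide),
      str_step _ _ (by decide), str_step _ _ (by decide), str_step _ _ (by decide),
      str_step _ _ (by decide), str_step _ _ (by decide)]
  rfl

theorem solution_spec : Claim_equal_solution := by
  intro string _
  unfold Spec_solution solution_alt
  rw [solution_eq_pipe, main_eq]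
  simp
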